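-- pv_equiv track=rewrite | github.com/qtcyy/LeetCode-Record-3.17 | 位运算/chapter2/2564/2564.子字符串异或查询.py | substringXorQueries
-- ===== SOURCE A (Python) =====
-- from typing import List
--
-- def substringXorQueries(s: str, queries: List[List[int]]) -> List[List[int]]:
--     n = len(s)
--     d = {}
--
--     for i in range(n):
--         if s[i] == "0":
--             if 0 not in d:
--                 d[0] = [i, i]
--             continue
--         val = 0
--         for j in range(i, min(i + 32, n)):
--             val = (val << 1) | int(s[j])
--             if val not in d:
--                 d[val] = [i, j]
--             elif j - i < d[val][1] - d[val][0]:
--                 d[val] = [i, j]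
--
--     return [d.get(x ^ y, [-1, -1]) for x, y in queries]
-- ===== SOURCE B (Python) =====
-- from typing import List
--
-- def substringXorQueries(s: str, queries: List[List[int]]) -> List[List[int]]:
--     res = []
--     for x, y in queries:
--         t = bin(x ^ y)[2:]
--         i = s.find(t)
--         res.append([i, i + len(t) - 1] if i != -1 else [-1, -1])
--     return res
-- ===== Notes on version B (the rewrite author's own statement) =====
-- stated objective: simpler
-- what changed: B drops A's precomputed dictionary of all <=32-bit substring values and instead answers each query directly with s.find(bin(x^y)[2:]), returning the position of the first (= shortest, leftmost) occurrence of the query's binary string.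
-- outside the precondition, e.g. on substringXorQueries('2', [[2, 0]]): A returns [[0, 0]], B returns [[-1, -1]]
import Mathlib
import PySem

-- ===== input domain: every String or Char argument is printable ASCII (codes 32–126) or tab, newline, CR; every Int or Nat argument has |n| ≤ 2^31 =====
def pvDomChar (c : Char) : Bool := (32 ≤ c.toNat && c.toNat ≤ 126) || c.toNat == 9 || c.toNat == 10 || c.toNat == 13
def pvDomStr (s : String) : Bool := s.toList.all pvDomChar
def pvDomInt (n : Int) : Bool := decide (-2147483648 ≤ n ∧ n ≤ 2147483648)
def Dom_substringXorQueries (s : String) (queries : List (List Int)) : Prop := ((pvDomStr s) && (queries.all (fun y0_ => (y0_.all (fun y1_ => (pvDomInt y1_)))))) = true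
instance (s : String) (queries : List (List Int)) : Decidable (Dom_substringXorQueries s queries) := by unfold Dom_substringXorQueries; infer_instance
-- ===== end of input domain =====

-- B replaces A's precomputed dictionary of all ≤32-bit substring values by a direct
-- per-query substring search s.find(bin(x^y)[2:]) (objective: simpler; not claimed faster).

-- ===== PORT A =====

-- int(s[j]) for the 1-character string s[j]; ofChars? none = ValueError, excluded by Pre_
def aDigit (cs : List Char) (j : Int) : Int :=
  match PySem.List.pyGet? cs j with
  | some c => (PySem.Int.ofChars? [c]).getD 0
  | none => 0

-- body of A's inner 'for j in range(i, min(i+32, n))' loop; state = (d, val)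
def aInnerStep (cs : List Char) (i : Int) (p : PySem.Dict Int (List Int) × Int) (j : Int) :
    PySem.Dict Int (List Int) × Int :=
  let val := PySem.Int.bor (p.2 <<< (1 : Nat)) (aDigit cs j)
  if p.1.contains val = false then (p.1.insert val [i, j], val)
  else
    let e := p.1.getD val []   -- d[val] (key present on this branch)
    if j - i < (PySem.List.pyGet? e 1).getD 0 - (PySem.List.pyGet? e 0).getD 0 then
      (p.1.insert val [i, j], val)
    else (p.1, val)

-- body of A's outer 'for i in range(n)' loop
def aOuterStep (cs : List Char) (n : Int) (d : PySem.Dict Int (List Int)) (i : Int) :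
    PySem.Dict Int (List Int) :=
  if (PySem.List.pyGet? cs i).getD ' ' = '0' then
    (if d.contains 0 then d else d.insert 0 [i, i])
  else
    ((PySem.List.pyRange i (min (i + 32) n)).foldl (aInnerStep cs i) (d, 0)).1

def substringXorQueries (s : String) (queries : List (List Int)) : List (List Int) :=
  let n := PySem.Str.len s
  let d := (PySem.List.pyRange 0 n).foldl (aOuterStep s.toList n) PySem.Dict.empty
  queries.map (fun q =>
    match q with
    | [x, y] => d.getD (PySem.Int.bxor x y) [-1, -1]
    | _ => [-1, -1])   -- 'for x, y in queries' raises on non-pairs; excluded by Pre_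

-- ===== PORT B =====

-- one loop iteration of B: t = bin(x ^ y)[2:]; i = s.find(t)
def bAnswer (s : String) (q : List Int) : List Int :=
  -- x, y = q  (unpacking raises on non-pairs; those inputs are excluded by Pre_, defaulted here)
  let x := (PySem.List.pyGet? q 0).getD 0
  let y := (PySem.List.pyGet? q 1).getD 0
  let t := PySem.Str.slice (PySem.Int.pyBin (PySem.Int.bxor x y)) (some 2) none
  let i := PySem.Str.find s t
  if i ≠ -1 then [i, i + PySem.Str.len t - 1] else [-1, -1]

def substringXorQueries_alt (s : String) (queries : List (List Int)) : List (List Int) :=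
  queries.foldl (fun res q => res ++ [bAnswer s q]) []

-- ===== PRECONDITION & SPEC =====

-- Pre_ restricts s to binary '0'/'1' strings (the function's natural domain) and queries to
-- pairs: A raises ValueError on any non-digit character of s and on non-pair queries, and on
-- digit characters '2'-'9' its (val << 1) | int(s[j]) accumulation returns accidental
-- multi-bit-per-character values that no reading of the task would specify.
def Pre_substringXorQueries (s : String) (queries : List (List Int)) : Prop :=
  (s.toList.all (fun c => c == '0' || c == '1') = true) ∧ (queries.all (fun q => q.length == 2) = true)

instance (s : String) (queries : List (List Int)) : Decidable (Pre_substringXorQueries s queries) := by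
  unfold Pre_substringXorQueries; infer_instance

def pvWitness_substringXorQueries : String × List (List Int) :=
  ("0110", [[2, 1], [0, 0], [5, 2]])

def Spec_substringXorQueries (s : String) (queries : List (List Int)) (out : List (List Int)) : Prop :=
  out = substringXorQueries_alt s queries
instance (s : String) (queries : List (List Int)) (out : List (List Int)) : Decidable (Spec_substringXorQueries s queries out) := by
  unfold Spec_substringXorQueries; infer_instance

-- ===== CLAIM (what is proved, stated in full; the proofs are below) =====
def Claim_equal_substringXorQueries : Prop :=
  ∀ (s : String) (queries : List (List Int)), Dom_substringXorQueries s queries →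
    Pre_substringXorQueries s queries →
    Spec_substringXorQueries s queries (substringXorQueries s queries)

-- ===== LEMMAS AND PROOFS =====

def toD (m : Nat) : List Char :=
  if h : m < 2 then [Nat.digitChar m]
  else toD (m / 2) ++ [Nat.digitChar (m % 2)]
decreasing_by exact Nat.div_lt_self (by omega) (by omega)

def valOf (l : List Char) : Int :=
  l.foldl (fun v c => 2 * v + (if c = '1' then 1 else 0)) 0

lemma toDigitsCore_eq (fuel m : Nat) (ds : List Char) (h : m < fuel) :
    Nat.toDigitsCore 2 fuel m ds = toD m ++ ds := by
  induction fuel generalizing m ds with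
  | zero => omega
  | succ f ih =>
    rw [Nat.toDigitsCore]
    by_cases h2 : m < 2
    · have : m / 2 = 0 := by omega
      simp only [this, if_pos rfl]
      rw [toD]; simp [h2]
      congr 1; omega
    · have hne : m / 2 ≠ 0 := by omega
      simp only [hne, if_neg hne]
      rw [ih (m / 2) _ (by omega)]
      conv_rhs => rw [toD]
      simp [h2]

lemma toDigits_eq_toD (m : Nat) : Nat.toDigits 2 m = toD m := by
  simpa using toDigitsCore_eq (m + 1) m [] (by omega)

lemma toD_mem (m : Nat) : ∀ c ∈ toD m, c = '0' ∨ c = '1' := by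
  induction m using toD.induct with
  | case1 m h =>
    rw [toD]; simp [h]
    interval_cases m <;> simp [Nat.digitChar]
  | case2 m h ih =>
    rw [toD]; simp only [dif_neg h]
    intro c hc
    rcases List.mem_append.1 hc with h1 | h1
    · exact ih c h1
    · simp at h1; subst h1
      have : m % 2 = 0 ∨ m % 2 = 1 := by omega
      rcases this with h2 | h2 <;> simp [h2, Nat.digitChar]

lemma toD_head (m : Nat) (hm : 1 ≤ m) : ∃ r, toD m = '1' :: r := by
  induction m using toD.induct with
  | case1 m h =>
    have : m = 1 := by omega
    subst this
    refine ⟨[], ?_⟩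
    rw [toD]
    decide
  | case2 m h ih =>
    rw [toD]; simp only [dif_neg h]
    obtain ⟨r, hr⟩ := ih (by omega)
    exact ⟨r ++ [Nat.digitChar (m % 2)], by rw [hr]; simp⟩

lemma toD_ne_nil (m : Nat) : toD m ≠ [] := by
  rw [toD]; split <;> simp

lemma valOf_append (l : List Char) (c : Char) :
    valOf (l ++ [c]) = 2 * valOf l + (if c = '1' then 1 else 0) := by
  simp [valOf, List.foldl_append]

lemma valOf_toD (m : Nat) : valOf (toD m) = m := by
  induction m using toD.induct with
  | case1 m h =>
    rw [toD]; simp [h]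
    interval_cases m <;> simp [valOf, Nat.digitChar]
  | case2 m h ih =>
    rw [toD]; simp only [dif_neg h]
    rw [valOf_append, ih]
    have : m % 2 = 0 ∨ m % 2 = 1 := by omega
    rcases this with h2 | h2 <;> simp [h2, Nat.digitChar] <;> omega

lemma valOf_nonneg (l : List Char) : 0 ≤ valOf l := by
  induction l using List.reverseRecOn with
  | nil => simp [valOf]
  | append_singleton l c ih => rw [valOf_append]; split <;> omega

lemma valOf_bounds (l : List Char) (hb : ∀ c ∈ l, c = '0' ∨ c = '1') (hh : ∃ r, l = '1' :: r) :
    (2 : Int) ^ (l.length - 1) ≤ valOf l ∧ valOf l < 2 ^ l.length := by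
  induction l using List.reverseRecOn with
  | nil => rcases hh with ⟨r, hr⟩; simp at hr
  | append_singleton l c ih =>
    rw [valOf_append]
    rcases eq_or_ne l [] with rfl | hne
    · rcases hh with ⟨r, hr⟩
      simp at hr
      rcases hr with ⟨rfl, rfl⟩
      simp [valOf]
    · have hh' : ∃ r, l = '1' :: r := by
        rcases l with _ | ⟨a, as⟩
        · exact absurd rfl hne
        · rcases hh with ⟨r, hr⟩
          simp at hr
          exact ⟨as, by rw [hr.1]⟩
      have hb' : ∀ c ∈ l, c = '0' ∨ c = '1' := fun c hc => hb c (List.mem_append_left _ hc)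
      obtain ⟨h1, h2⟩ := ih hb' hh'
      have hlen : 1 ≤ l.length := by rcases hh' with ⟨r, rfl⟩; simp
      have hc : c = '0' ∨ c = '1' := hb c (by simp)
      have e1 : (2 : Int) ^ l.length = 2 ^ (l.length - 1) * 2 := by
        rw [← pow_succ]; congr 1; omega
      have e2 : (2 : Int) ^ (l.length + 1) = 2 ^ l.length * 2 := by rw [← pow_succ]
      simp only [List.length_append, List.length_cons, List.length_nil]
      constructor
      · have : l.length + 1 - 1 = l.length := by omega
        rw [this, e1]
        rcases hc with rfl | rfl <;> simp <;> omega
      · rw [e2]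
        rcases hc with rfl | rfl <;> simp <;> omega

lemma toD_valOf (l : List Char) (hb : ∀ c ∈ l, c = '0' ∨ c = '1') (hh : ∃ r, l = '1' :: r) :
    toD (valOf l).toNat = l := by
  induction l using List.reverseRecOn with
  | nil => rcases hh with ⟨r, hr⟩; simp at hr
  | append_singleton l c ih =>
    rcases eq_or_ne l [] with rfl | hne
    · rcases hh with ⟨r, hr⟩
      simp at hr
      rcases hr with ⟨rfl, rfl⟩
      show toD (valOf ['1']).toNat = ['1']
      have : valOf ['1'] = 1 := by simp [valOf]
      rw [this]
      rw [toD]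
      decide
    · have hh' : ∃ r, l = '1' :: r := by
        rcases l with _ | ⟨a, as⟩
        · exact absurd rfl hne
        · rcases hh with ⟨r, hr⟩
          simp at hr
          exact ⟨as, by rw [hr.1]⟩
      have hb' : ∀ c ∈ l, c = '0' ∨ c = '1' := fun c hc => hb c (List.mem_append_left _ hc)
      have hv1 : 1 ≤ valOf l := by
        obtain ⟨h1, _⟩ := valOf_bounds l hb' hh'
        calc (1 : Int) = 2 ^ 0 := by norm_num
        _ ≤ 2 ^ (l.length - 1) := by apply pow_le_pow_right₀ <;> omega
        _ ≤ valOf l := h1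
      have hc : c = '0' ∨ c = '1' := hb c (by simp)
      rw [valOf_append]
      have hbn : (if c = '1' then (1:Int) else 0) = 0 ∨ (if c = '1' then (1:Int) else 0) = 1 := by
        split <;> simp
      set b : Int := if c = '1' then (1:Int) else 0 with hbdef
      have htn : (2 * valOf l + b).toNat = 2 * (valOf l).toNat + b.toNat := by
        rcases hbn with h | h <;> rw [h] <;> omega
      rw [htn]
      have h2 : ¬ (2 * (valOf l).toNat + b.toNat < 2) := by omega
      rw [toD]
      rw [dif_neg h2]
      have hdiv : (2 * (valOf l).toNat + b.toNat) / 2 = (valOf l).toNat := by omega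
      have hmod : (2 * (valOf l).toNat + b.toNat) % 2 = b.toNat := by
        rcases hbn with h | h <;> rw [h] <;> omega
      rw [hdiv, hmod, ih hb' hh']
      congr 1
      rcases hc with rfl | rfl <;> simp [hbdef] <;> decide

lemma bitLength_eq_of_bounds (v : Int) (e : Nat) (he : 1 ≤ e)
    (h1 : (2 : Int) ^ (e - 1) ≤ v) (h2 : v < 2 ^ e) :
    PySem.Int.bitLength v = e := by
  have hv0 : 0 < v := lt_of_lt_of_le (by positivity) h1
  have hne : v ≠ 0 := by omega
  have hub := PySem.Int.lt_two_pow_bitLength v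
  have hlb := PySem.Int.two_pow_bitLength_le v hne
  set B := PySem.Int.bitLength v with hB
  have hna : (v.natAbs : Int) = v := Int.natAbs_of_nonneg (by omega)
  have h1' : 2 ^ (e - 1) ≤ v.natAbs := by
    have : ((2:Int) ^ (e-1)) ≤ (v.natAbs : Int) := by rw [hna]; exact h1
    exact_mod_cast this
  have h2' : v.natAbs < 2 ^ e := by
    have : (v.natAbs : Int) < 2 ^ e := by rw [hna]; exact h2
    exact_mod_cast this
  have hBe : B - 1 < e := by
    by_contra hcon
    have : 2 ^ e ≤ 2 ^ (B - 1) := Nat.pow_le_pow_right (by norm_num) (by omega)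
    omega
  have heB : e - 1 < B := by
    by_contra hcon
    have : 2 ^ B ≤ 2 ^ (e - 1) := Nat.pow_le_pow_right (by norm_num) (by omega)
    omega
  omega

lemma bitLength_valOf (l : List Char) (hb : ∀ c ∈ l, c = '0' ∨ c = '1') (hh : ∃ r, l = '1' :: r) :
    PySem.Int.bitLength (valOf l) = l.length := by
  rcases valOf_bounds l hb hh with ⟨h1, h2⟩
  have : 1 ≤ l.length := by rcases hh with ⟨r, rfl⟩; simp
  exact bitLength_eq_of_bounds _ _ this h1 h2

lemma toD_length (m : Nat) (hm : 1 ≤ m) : ((toD m).length : Int) = PySem.Int.bitLength (m : Int) := by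
  have hb := toD_mem m
  have hh := toD_head m hm
  have := bitLength_valOf (toD m) hb hh
  rw [valOf_toD] at this
  exact_mod_cast this.symm

lemma bitLength_le_32 (v : Int) (h0 : 0 ≤ v) (h : v < 2 ^ 32) : PySem.Int.bitLength v ≤ 32 := by
  rcases eq_or_ne v 0 with rfl | hne
  · simp [PySem.Int.bitLength_zero]
  · have hlb := PySem.Int.two_pow_bitLength_le v hne
    have hna : (v.natAbs : Int) = v := Int.natAbs_of_nonneg h0
    have h2' : v.natAbs < 2 ^ 32 := by
      have : (v.natAbs : Int) < 2 ^ 32 := by rw [hna]; exact h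
      exact_mod_cast this
    by_contra hcon
    have : 2 ^ 32 ≤ 2 ^ (PySem.Int.bitLength v - 1) := Nat.pow_le_pow_right (by norm_num) (by omega)
    omega

lemma bxor_bound (x y : Int) (hx : -2147483648 ≤ x ∧ x ≤ 2147483648)
    (hy : -2147483648 ≤ y ∧ y ≤ 2147483648) :
    PySem.Int.bxor x y < 0 ∨ (0 ≤ PySem.Int.bxor x y ∧ PySem.Int.bxor x y < 2 ^ 32) := by
  unfold PySem.Int.bxor
  split_ifs with h1 h2 h2
  · right
    have hb : x.toNat ^^^ y.toNat < 2 ^ 32 :=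
      Nat.xor_lt_two_pow (by omega) (by omega)
    constructor
    · positivity
    · exact_mod_cast hb
  · left
    have : (0:Int) ≤ (x.toNat ^^^ (-y - 1).toNat : Nat) := by positivity
    omega
  · left
    have : (0:Int) ≤ ((-x - 1).toNat ^^^ y.toNat : Nat) := by positivity
    omega
  · right
    have hb : (-x - 1).toNat ^^^ (-y - 1).toNat < 2 ^ 32 :=
      Nat.xor_lt_two_pow (by omega) (by omega)
    constructor
    · positivity
    · exact_mod_cast hb

lemma two_mul_or_one (k : Nat) : 2 * k ||| 1 = 2 * k + 1 := by
  have h := Nat.lor_bit false k true 0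
  simpa [Nat.bit] using h

lemma shift_or_bit (v b : Int) (hv : 0 ≤ v) (hb : b = 0 ∨ b = 1) :
    PySem.Int.bor (v <<< (1 : Nat)) b = 2 * v + b := by
  have hs : v <<< (1 : Nat) = 2 * v := by
    rw [Int.shiftLeft_eq]
    ring
  rcases hb with rfl | rfl
  · rw [hs, PySem.Int.bor_zero]; ring
  · rw [hs]
    have h2 : (2 * v) = ((2 * v.toNat : Nat) : Int) := by omega
    rw [h2]
    have : (1 : Int) = ((1 : Nat) : Int) := rfl
    rw [this, PySem.Int.bor_natCast, two_mul_or_one]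
    omega

lemma find?_range_min {p : Nat → Bool} (n a : Nat) (ha : a < n) (hp : p a = true)
    (hmin : ∀ b < a, p b = false) : (List.range n).find? p = some a := by
  induction n with
  | zero => omega
  | succ m ih =>
    rw [List.range_succ, List.find?_append]
    rcases Nat.lt_or_ge a m with h | h
    · rw [ih h]; rfl
    · have ham : a = m := by omega
      subst ham
      have h1 : (List.range a).find? p = none := by
        rw [List.find?_eq_none]
        intro x hx
        simp at hx
        simp [hmin x hx]
      rw [h1]
      simp [hp]

lemma aDigit_eq (cs : List Char) (hb : ∀ c ∈ cs, c = '0' ∨ c = '1') (j : Nat) (hj : j < cs.length) :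
    aDigit cs (j : Int) = if cs[j] = '1' then 1 else 0 := by
  unfold aDigit
  rw [PySem.List.pyGet?_natCast, List.getElem?_eq_getElem hj]
  rcases hb cs[j] (List.getElem_mem hj) with h | h <;> rw [h] <;> simp <;> decide

lemma pyRange_natCast (a b : Nat) :
    PySem.List.pyRange (a : Int) (b : Int) = (List.range (b - a)).map (fun t => ((a + t : Nat) : Int)) := by
  unfold PySem.List.pyRange
  rcases Nat.lt_or_ge a b with h | h
  · have h' : (a : Int) < b := by exact_mod_cast h
    simp only [if_neg (by norm_num : (1:Int) ≠ 0)]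
    norm_num [h']
    try rw [← List.map_eq_flatMap]
    try simp
    try (apply List.map_congr_left; intro t ht; push_cast; ring)
  · have h' : ¬ ((a : Int) < b) := by exact_mod_cast Nat.not_lt.mpr h
    have : b - a = 0 := by omega
    rw [this]
    simp [h']

def occursB (cs : List Char) (v : Int) (a : Nat) : Bool :=
  decide (0 ≤ v) && decide (PySem.Int.bitLength v ≤ 32) && decide (toD v.toNat <+: cs.drop a)

def entryFor (v : Int) (a : Nat) : List Int :=
  [(a : Int), (a : Int) + ((toD v.toNat).length : Int) - 1]

def InvA (cs : List Char) (k : Nat) (d : PySem.Dict Int (List Int)) : Prop :=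
  ∀ v : Int, d.get? v = ((List.range k).find? (occursB cs v)).map (entryFor v)

def innerC (cs : List Char) (k : Nat) (m : Nat) (v : Int) : Option (List Int) :=
  if 0 < v ∧ PySem.Int.bitLength v ≤ m ∧ toD v.toNat <+: cs.drop k then some (entryFor v k)
  else none

def InvI (cs : List Char) (k : Nat) (d : PySem.Dict Int (List Int)) (m : Nat)
    (p : PySem.Dict Int (List Int) × Int) : Prop :=
  p.2 = valOf ((cs.drop k).take m) ∧ ∀ v, p.1.get? v = (d.get? v).or (innerC cs k m v)

lemma bitLength_pos (v : Int) (hv : 0 < v) : 1 ≤ PySem.Int.bitLength v := by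
  by_contra h
  have h0 : PySem.Int.bitLength v = 0 := by omega
  have := PySem.Int.lt_two_pow_bitLength v
  rw [h0] at this
  simp at this
  omega

lemma innerC_zero (cs : List Char) (k : Nat) (v : Int) : innerC cs k 0 v = none := by
  unfold innerC
  rw [if_neg]
  rintro ⟨h1, h2, -⟩
  have := bitLength_pos v h1
  omega

lemma tk_facts (cs : List Char) (k m : Nat) (hb : ∀ c ∈ cs, c = '0' ∨ c = '1')
    (hck : cs[k]? = some '1') (h1 : 1 ≤ m) (h2 : k + m ≤ cs.length) :
    ((cs.drop k).take m).length = m ∧ (∀ c ∈ (cs.drop k).take m, c = '0' ∨ c = '1') ∧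
      (∃ r, (cs.drop k).take m = '1' :: r) := by
  have hk : k < cs.length := by omega
  refine ⟨by simp; omega, ?_, ?_⟩
  · intro c hc
    exact hb c (List.mem_of_mem_drop (List.mem_of_mem_take hc))
  · rw [List.drop_eq_getElem_cons hk]
    have : cs[k] = '1' := by
      have := List.getElem?_eq_getElem hk
      rw [this] at hck
      exact Option.some_injective _ hck
    rw [this]
    rcases m with _ | m'
    · omega
    · exact ⟨(cs.drop (k+1)).take m', by simp⟩

lemma vAt_facts (cs : List Char) (k m : Nat) (hb : ∀ c ∈ cs, c = '0' ∨ c = '1')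
    (hck : cs[k]? = some '1') (h1 : 1 ≤ m) (h2 : k + m ≤ cs.length) :
    0 < valOf ((cs.drop k).take m) ∧
      PySem.Int.bitLength (valOf ((cs.drop k).take m)) = m ∧
      toD (valOf ((cs.drop k).take m)).toNat = (cs.drop k).take m := by
  obtain ⟨hlen, hbin, hhead⟩ := tk_facts cs k m hb hck h1 h2
  obtain ⟨hlb, hub⟩ := valOf_bounds _ hbin hhead
  have hpos : 0 < valOf ((cs.drop k).take m) := lt_of_lt_of_le (by positivity) hlb
  refine ⟨hpos, ?_, toD_valOf _ hbin hhead⟩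
  rw [bitLength_valOf _ hbin hhead, hlen]

lemma val_unique (cs : List Char) (k m : Nat) (v : Int) (hb : ∀ c ∈ cs, c = '0' ∨ c = '1')
    (h2 : k + m ≤ cs.length) (hv : 0 < v) (hlen : PySem.Int.bitLength v = m)
    (hpre : toD v.toNat <+: cs.drop k) : v = valOf ((cs.drop k).take m) := by
  have hm1 : 1 ≤ m := hlen ▸ bitLength_pos v hv
  have hvn : 1 ≤ v.toNat := by omega
  have hcast : ((v.toNat : Nat) : Int) = v := by omega
  have hdl : ((toD v.toNat).length : Int) = (m : Int) := by
    rw [toD_length v.toNat hvn, hcast, hlen]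
  have hdlen : (toD v.toNat).length = m := by exact_mod_cast hdl
  have heq : toD v.toNat = (cs.drop k).take m := by
    rw [List.prefix_iff_eq_take] at hpre
    rw [hpre, hdlen]
  have := valOf_toD v.toNat
  rw [heq] at this
  omega

lemma innerC_succ_eq (cs : List Char) (k m : Nat) (v : Int)
    (hb : ∀ c ∈ cs, c = '0' ∨ c = '1') (hkm : k + m < cs.length)
    (hne : v ≠ valOf ((cs.drop k).take (m + 1))) :
    innerC cs k (m + 1) v = innerC cs k m v := by
  unfold innerC
  have hcond : (0 < v ∧ PySem.Int.bitLength v ≤ m + 1 ∧ toD v.toNat <+: cs.drop k) ↔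
      (0 < v ∧ PySem.Int.bitLength v ≤ m ∧ toD v.toNat <+: cs.drop k) := by
    constructor
    · rintro ⟨hv, hbl, hpre⟩
      refine ⟨hv, ?_, hpre⟩
      rcases Nat.lt_or_ge (PySem.Int.bitLength v) (m + 1) with h | h
      · omega
      · have hlen : PySem.Int.bitLength v = m + 1 := by omega
        exact absurd (val_unique cs k (m+1) v hb (by omega) hv hlen hpre) hne
    · rintro ⟨hv, hbl, hpre⟩
      exact ⟨hv, by omega, hpre⟩
  rw [if_congr hcond rfl rfl]

lemma pyGet2_0 (x0 x1 : Int) : (PySem.List.pyGet? [x0, x1] 0).getD 0 = x0 := by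
  simp [PySem.List.pyGet?, PySem.List.pyIdx?]

lemma pyGet2_1 (x0 x1 : Int) : (PySem.List.pyGet? [x0, x1] 1).getD 0 = x1 := by
  simp [PySem.List.pyGet?, PySem.List.pyIdx?]

lemma inner_step (cs : List Char) (hb : ∀ c ∈ cs, c = '0' ∨ c = '1') (k : Nat)
    (hck : cs[k]? = some '1') (d : PySem.Dict Int (List Int)) (hd : InvA cs k d)
    (m : Nat) (hm : k + m < cs.length) (p : PySem.Dict Int (List Int) × Int)
    (hp : InvI cs k d m p) :
    InvI cs k d (m + 1) (aInnerStep cs (k : Int) p ((k + m : Nat) : Int)) := by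
  obtain ⟨hval, hget⟩ := hp
  have hdig : aDigit cs ((k + m : Nat) : Int) = if cs[k + m] = '1' then (1 : Int) else 0 :=
    aDigit_eq cs hb (k + m) hm
  have htksucc : (cs.drop k).take (m + 1) = (cs.drop k).take m ++ [cs[k + m]] := by
    rw [List.take_succ]
    congr 1
    have hlt : m < (cs.drop k).length := by simp; omega
    rw [List.getElem?_eq_getElem hlt]
    simp [List.getElem_drop]
  set vnew := valOf ((cs.drop k).take (m + 1)) with hvnew
  have hval' : PySem.Int.bor (p.2 <<< (1 : Nat)) (aDigit cs ((k + m : Nat) : Int)) = vnew := by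
    rw [hdig, hval, shift_or_bit _ _ (valOf_nonneg _) (by split <;> simp)]
    rw [hvnew, htksucc, valOf_append]
  obtain ⟨hpos, hbl, htoD⟩ := vAt_facts cs k (m + 1) hb hck (by omega) (by omega)
  rw [← hvnew] at hpos hbl htoD
  have hlenl : ((cs.drop k).take (m + 1)).length = m + 1 := by simp; omega
  have hlentoD : (toD vnew.toNat).length = m + 1 := by rw [htoD]; exact hlenl
  have hpre' : toD vnew.toNat <+: cs.drop k := by rw [htoD]; exact List.take_prefix _ _
  unfold aInnerStep
  simp only [hval']
  by_cases hcont : p.1.contains vnew = false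
  · rw [if_pos hcont]
    have hnone : p.1.get? vnew = none := (PySem.Dict.get?_eq_none_iff_contains _ _).2 hcont
    have hor := hget vnew
    rw [hnone] at hor
    have hdnone : d.get? vnew = none ∧ innerC cs k m vnew = none := by
      cases h1 : d.get? vnew <;> cases h2 : innerC cs k m vnew <;>
        rw [h1, h2] at hor <;> simp at hor <;> simp
    refine ⟨rfl, fun v => ?_⟩
    rw [PySem.Dict.get?_insert]
    by_cases hv : v = vnew
    · subst hv
      rw [if_pos rfl, hdnone.1, Option.none_or]
      unfold innerC
      rw [if_pos ⟨hpos, by omega, hpre'⟩]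
      unfold entryFor
      rw [hlentoD]
      congr 2
      push_cast
      ring
    · rw [if_neg hv, hget v, innerC_succ_eq cs k m v hb hm hv]
  · rw [if_neg hcont]
    have hissome : (p.1.get? vnew).isSome := by
      rw [← PySem.Dict.contains_eq_isSome_get?]
      revert hcont
      cases p.1.contains vnew <;> simp
    obtain ⟨e, he⟩ := Option.isSome_iff_exists.mp hissome
    have hor := hget vnew
    have hicnone : innerC cs k m vnew = none := by
      unfold innerC
      rw [if_neg]
      rintro ⟨-, hle, -⟩
      omega
    rw [he, hicnone] at hor
    have hde : d.get? vnew = some e := by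
      cases h1 : d.get? vnew <;> rw [h1] at hor <;> simp at hor
      · rw [hor]
    obtain ⟨a, -, hea⟩ : ∃ a, ((List.range k).find? (occursB cs vnew)) = some a ∧ e = entryFor vnew a := by
      have := hd vnew
      rw [hde] at this
      cases h2 : (List.range k).find? (occursB cs vnew) <;> rw [h2] at this <;> simp at this
      · exact ⟨_, rfl, this⟩
    have hgetD : p.1.getD vnew [] = e := PySem.Dict.getD_of_get?_eq_some _ _ he
    rw [hgetD, hea]
    unfold entryFor
    rw [hlentoD, pyGet2_0, pyGet2_1]
    rw [if_neg (by push_cast; omega)]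
    refine ⟨rfl, fun v => ?_⟩
    rw [hget v]
    by_cases hv : v = vnew
    · subst hv
      rw [hde, Option.some_or, Option.some_or]
    · rw [innerC_succ_eq cs k m v hb hm hv]

lemma inner_loop (cs : List Char) (hb : ∀ c ∈ cs, c = '0' ∨ c = '1') (k : Nat)
    (hck : cs[k]? = some '1') (d : PySem.Dict Int (List Int)) (hd : InvA cs k d)
    (m : Nat) (hm : k + m ≤ min (k + 32) cs.length) :
    InvI cs k d m (((List.range m).map (fun t => ((k + t : Nat) : Int))).foldl (aInnerStep cs (k : Int)) (d, 0)) := by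
  induction m with
  | zero =>
    refine ⟨by simp [valOf], fun v => ?_⟩
    rw [innerC_zero]
    cases h : d.get? v <;> simp [h]
  | succ m' ih =>
    rw [List.range_succ, List.map_append, List.foldl_append]
    simp only [List.map_cons, List.map_nil, List.foldl_cons, List.foldl_nil]
    exact inner_step cs hb k hck d hd m' (by omega) _ (ih (by omega))

lemma occursB_at_zero (cs : List Char) (k : Nat) (hk : k < cs.length) (hck : cs[k] = '0') (v : Int) :
    occursB cs v k = decide (v = 0) := by
  unfold occursB
  rcases lt_trichotomy v 0 with h | rfl | h
  · simp [(show ¬ ((0:Int) ≤ v) by omega), (show ¬ (v = 0) by omega)]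
  · have h0 : toD (0 : Int).toNat = ['0'] := by rw [toD]; decide
    rw [h0]
    have : ['0'] <+: cs.drop k := by
      rw [List.drop_eq_getElem_cons hk, hck]
      exact ⟨cs.drop (k+1), rfl⟩
    simp [this, PySem.Int.bitLength_zero]
  · have hpre : ¬ (toD v.toNat <+: cs.drop k) := by
      obtain ⟨r, hr⟩ := toD_head v.toNat (by omega)
      rw [hr, List.drop_eq_getElem_cons hk, hck]
      intro hcon
      rcases List.prefix_cons_iff.mp hcon with h | ⟨t, ht, -⟩
      · simp at h
      · simp at ht
    simp [hpre, (show ¬ (v = 0) by omega)]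

lemma occursB_at_one (cs : List Char) (hb : ∀ c ∈ cs, c = '0' ∨ c = '1') (k : Nat)
    (hk : k < cs.length) (hck : cs[k]? = some '1') (v : Int) :
    innerC cs k (min (k + 32) cs.length - k) v =
      (if occursB cs v k then some (entryFor v k) else none) := by
  unfold innerC occursB
  rcases lt_trichotomy v 0 with h | rfl | h
  · simp [(show ¬ ((0:Int) < v) by omega), (show ¬ ((0:Int) ≤ v) by omega)]
  · have h00 : toD (0 : Nat) = ['0'] := by rw [toD]; decide
    have hck' : cs[k] = '1' := by
      have := List.getElem?_eq_getElem hk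
      rw [this] at hck
      exact Option.some_injective _ hck
    have hpre : ¬ (['0'] <+: cs.drop k) := by
      rw [List.drop_eq_getElem_cons hk, hck']
      intro hcon
      rcases List.prefix_cons_iff.mp hcon with h | ⟨t, ht, -⟩
      · simp at h
      · simp at ht
    simp [lt_irrefl, h00, hpre]
  · by_cases hpre : toD v.toNat <+: cs.drop k
    · have hlen : (toD v.toNat).length ≤ cs.length - k := by
        have := hpre.length_le
        simpa using this
      have hbl : ((toD v.toNat).length : Int) = PySem.Int.bitLength v := by
        have := toD_length v.toNat (by omega)
        rwa [show ((v.toNat : Nat) : Int) = v by omega] at this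
      have hbl' : (toD v.toNat).length = PySem.Int.bitLength v := by exact_mod_cast hbl
      have hiff : (PySem.Int.bitLength v ≤ min (k + 32) cs.length - k) ↔ (PySem.Int.bitLength v ≤ 32) := by
        omega
      simp [h, hpre, (show (0:Int) ≤ v by omega), hiff]
    · simp [hpre]

lemma outer_step (cs : List Char) (hb : ∀ c ∈ cs, c = '0' ∨ c = '1') (k : Nat)
    (hk : k < cs.length) (d : PySem.Dict Int (List Int)) (hd : InvA cs k d) :
    InvA cs (k + 1) (aOuterStep cs (cs.length : Int) d (k : Int)) := by
  have hfind : ∀ v, (List.range (k+1)).find? (occursB cs v) =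
      ((List.range k).find? (occursB cs v)).or (if occursB cs v k then some k else none) := by
    intro v
    rw [List.range_succ, List.find?_append]
    congr 1
    simp [List.find?]
    cases h : occursB cs v k <;> simp [h]
  have hmapor : ∀ (o o' : Option Nat) (f : Nat → List Int),
      (o.or o').map f = (o.map f).or (o'.map f) := by
    intro o o' f; cases o <;> simp
  unfold aOuterStep
  rw [PySem.List.pyGet?_natCast, List.getElem?_eq_getElem hk]
  rcases hb cs[k] (List.getElem_mem hk) with hck | hck
  · rw [hck]
    rw [Option.getD_some, if_pos rfl]
    by_cases hcont : d.contains 0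
    · rw [if_pos hcont]
      intro v
      rw [hd v, hfind v, hmapor, occursB_at_zero cs k hk hck v]
      by_cases hv : v = 0
      · subst hv
        have hissome : (d.get? 0).isSome := by rw [← PySem.Dict.contains_eq_isSome_get?, hcont]
        obtain ⟨e, he⟩ := Option.isSome_iff_exists.mp hissome
        have := hd 0
        rw [he] at this
        cases h2 : (List.range k).find? (occursB cs 0) with
        | none => rw [h2] at this; simp at this
        | some a => simp
      · simp [hv]
    · rw [if_neg hcont]
      intro v
      rw [PySem.Dict.get?_insert, hd v, hfind v, hmapor, occursB_at_zero cs k hk hck v]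
      have hnone : d.get? v = none ∨ v ≠ 0 := by
        by_cases hv : v = 0
        · subst hv
          left
          rw [PySem.Dict.get?_eq_none_iff_contains]
          revert hcont
          cases d.contains 0 <;> simp
        · right; exact hv
      by_cases hv : v = 0
      · subst hv
        rcases hnone with hn | hn
        · have := hd 0
          rw [hn] at this
          have hfn : (List.range k).find? (occursB cs 0) = none := by
            cases h2 : (List.range k).find? (occursB cs 0) with
            | none => rfl
            | some a => rw [h2] at this; simp at this
          rw [if_pos rfl, hfn]
          have h00 : (toD (0 : Nat)).length = 1 := by rw [toD]; decide
          simp [entryFor, h00]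
        · exact absurd rfl hn
      · rw [if_neg hv]
        simp [hv]
  · rw [hck]
    rw [Option.getD_some, if_neg (by decide)]
    have hck' : cs[k]? = some '1' := by rw [List.getElem?_eq_getElem hk, hck]
    have hcast : min ((k : Int) + 32) (cs.length : Int) = ((min (k + 32) cs.length : Nat) : Int) := by
      push_cast
      rfl
    rw [hcast, pyRange_natCast]
    have hloop := inner_loop cs hb k hck' d hd (min (k + 32) cs.length - k) (by omega)
    obtain ⟨-, hget⟩ := hloop
    intro v
    rw [hget v, hfind v, hmapor, hd v]
    congr 1
    rw [occursB_at_one cs hb k hk hck' v]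
    cases h : occursB cs v k <;> simp [h]

lemma outer_loop (cs : List Char) (hb : ∀ c ∈ cs, c = '0' ∨ c = '1') (k : Nat) (hk : k ≤ cs.length) :
    InvA cs k (((List.range k).map (fun t : Nat => (t : Int))).foldl (aOuterStep cs (cs.length : Int)) PySem.Dict.empty) := by
  induction k with
  | zero => intro v; simp [PySem.Dict.get?_empty]
  | succ k' ih =>
    rw [List.range_succ, List.map_append, List.foldl_append]
    simp only [List.map_cons, List.map_nil, List.foldl_cons, List.foldl_nil]
    exact outer_step cs hb k' (by omega) _ (ih (by omega))

lemma final_value (cs : List Char) (hb : ∀ c ∈ cs, c = '0' ∨ c = '1')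
    (d : PySem.Dict Int (List Int)) (hd : InvA cs cs.length d) (v : Int)
    (hv : v < 0 ∨ (0 ≤ v ∧ v < 2 ^ 32)) :
    d.getD v [-1, -1] =
      (if PySem.Chars.find cs (PySem.List.slice (PySem.Int.toBinChars0b v) (some 2) none) ≠ -1
       then [PySem.Chars.find cs (PySem.List.slice (PySem.Int.toBinChars0b v) (some 2) none),
             PySem.Chars.find cs (PySem.List.slice (PySem.Int.toBinChars0b v) (some 2) none) +
               ((PySem.List.slice (PySem.Int.toBinChars0b v) (some 2) none).length : Int) - 1]
       else [-1, -1]) := by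
  rw [PySem.Dict.getD_eq_get?_getD, hd v]
  rcases hv with hneg | ⟨h0, hub⟩
  · have hsl : PySem.List.slice (PySem.Int.toBinChars0b v) (some 2) none =
        'b' :: Nat.toDigits 2 v.natAbs := by
      rw [PySem.List.slice_from _ (by norm_num)]
      unfold PySem.Int.toBinChars0b
      rw [if_pos hneg]
      rfl
    have hfind : PySem.Chars.find cs ('b' :: Nat.toDigits 2 v.natAbs) = -1 := by
      rw [PySem.Chars.find_eq_neg_one_iff]
      intro hinf
      have hmem : 'b' ∈ cs := hinf.subset (by simp)
      rcases hb 'b' hmem with h | h <;> simp at h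
    have hocc : ∀ a, occursB cs v a = false := by
      intro a
      unfold occursB
      simp [(show ¬ ((0:Int) ≤ v) by omega)]
    have hfn : (List.range cs.length).find? (occursB cs v) = none := by
      rw [List.find?_eq_none]
      intro a _
      simp [hocc a]
    rw [hfn, hsl, hfind]
    simp
  · have hsl : PySem.List.slice (PySem.Int.toBinChars0b v) (some 2) none = toD v.toNat := by
      rw [PySem.List.slice_from _ (by norm_num)]
      unfold PySem.Int.toBinChars0b
      rw [if_neg (by omega)]
      show Nat.toDigits 2 v.toNat = toD v.toNat
      exact toDigits_eq_toD v.toNat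
    rw [hsl]
    have hbl32 : PySem.Int.bitLength v ≤ 32 := bitLength_le_32 v h0 hub
    have htne : toD v.toNat ≠ [] := toD_ne_nil v.toNat
    by_cases hfind : PySem.Chars.find cs (toD v.toNat) = -1
    · have hninf : ¬ (toD v.toNat <:+: cs) := (PySem.Chars.find_eq_neg_one_iff _ _).mp hfind
      have hfn : (List.range cs.length).find? (occursB cs v) = none := by
        rw [List.find?_eq_none]
        intro a _
        unfold occursB
        simp only [Bool.and_eq_true, decide_eq_true_eq, Bool.not_eq_true]
        by_cases hpre : toD v.toNat <+: cs.drop a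
        · exfalso
          apply hninf
          obtain ⟨r, hr⟩ := hpre
          exact ⟨cs.take a, r, by rw [List.append_assoc, hr]; exact List.take_append_drop a cs⟩
        · simp [hpre]
      rw [hfn, hfind]
      simp
    · have hspec := PySem.Chars.findFrom_natCast_spec cs (toD v.toNat) 0 (by omega)
      simp only [Nat.cast_zero, PySem.Chars.findFrom_zero] at hspec
      obtain ⟨h0le, hpre, hmin⟩ := hspec (by simpa using hfind)
      set i := PySem.Chars.find cs (toD v.toNat) with hi
      have hipos : 0 ≤ i := by simpa using h0le
      set a := i.toNat with ha
      have hiA : i = (a : Int) := by omega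
      have haLt : a < cs.length := by
        by_contra hcon
        have : cs.drop a = [] := List.drop_eq_nil_of_le (by omega)
        rw [this] at hpre
        exact htne (List.prefix_nil.mp hpre)
      have hocc : occursB cs v a = true := by
        unfold occursB
        simp [h0, hbl32, hpre]
      have hfn : (List.range cs.length).find? (occursB cs v) = some a := by
        apply find?_range_min _ _ haLt hocc
        intro b hb'
        unfold occursB
        have := hmin b (by omega) hb'
        simp [this]
      rw [hfn]
      rw [if_pos (by omega : i ≠ -1)]
      unfold entryFor
      simp [hiA]

lemma main_spec (s : String) (queries : List (List Int))
    (hdom : ((pvDomStr s) && (queries.all (fun y0_ => (y0_.all (fun y1_ => (pvDomInt y1_)))))) = true)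
    (hbin : ∀ c ∈ s.toList, c = '0' ∨ c = '1') (hq2 : ∀ q ∈ queries, q.length = 2) :
    substringXorQueries s queries = substringXorQueries_alt s queries := by
  unfold substringXorQueries substringXorQueries_alt
  rw [PySem.List.foldl_append_singleton_eq_map]
  simp only [List.nil_append]
  apply List.map_congr_left
  intro q hq
  have hlen := hq2 q hq
  rcases q with _ | ⟨x, _ | ⟨y, _ | ⟨z, r⟩⟩⟩ <;> simp at hlen
  -- q = [x, y]
  have hxy : ∀ z ∈ [x, y], pvDomInt z = true := by
    rw [Bool.and_eq_true] at hdom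
    have := hdom.2
    rw [List.all_eq_true] at this
    have := this [x, y] hq
    rwa [List.all_eq_true] at this
  have hx : -2147483648 ≤ x ∧ x ≤ 2147483648 := by
    have := hxy x (by simp)
    unfold pvDomInt at this
    exact of_decide_eq_true this
  have hy : -2147483648 ≤ y ∧ y ≤ 2147483648 := by
    have := hxy y (by simp)
    unfold pvDomInt at this
    exact of_decide_eq_true this
  set v := PySem.Int.bxor x y with hv
  show ((PySem.List.pyRange 0 (PySem.Str.len s)).foldl (aOuterStep s.toList (PySem.Str.len s))
      PySem.Dict.empty).getD v [-1, -1] = bAnswer s [x, y]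
  have hd : InvA s.toList s.toList.length
      ((PySem.List.pyRange 0 (PySem.Str.len s)).foldl (aOuterStep s.toList (PySem.Str.len s)) PySem.Dict.empty) := by
    rw [PySem.Str.len_eq, PySem.List.pyRange_zero_natCast]
    exact outer_loop s.toList hbin s.toList.length le_rfl
  have hfv := final_value s.toList hbin _ hd v (bxor_bound x y hx hy)
  rw [hfv]
  simp only [bAnswer, pyGet2_0, pyGet2_1]
  rw [PySem.Str.find_eq, PySem.Str.toList_slice, PySem.Chars.slice_eq_listSlice,
      PySem.Int.toList_pyBin, PySem.Str.len_eq, PySem.Str.toList_slice,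
      PySem.Chars.slice_eq_listSlice, PySem.Int.toList_pyBin]

-- ===== VERDICT (by name: the statement is the Claim_ definition above) =====
theorem substringXorQueries_spec : Claim_equal_substringXorQueries := by
  intro s queries hdom hpre
  unfold Spec_substringXorQueries
  obtain ⟨h1, h2⟩ := hpre
  rw [List.all_eq_true] at h1 h2
  refine main_spec s queries hdom (fun c hc => ?_) (fun q hq => ?_)
  · have := h1 c hc
    revert this
    simp
  · have := h2 q hq
    simpa using this
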